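-- pv_equiv track=rewrite | github.com/Helioviewer-Project/samp4jhv | ext/rhessi/image_cubes.py | _matching_chars
-- ===== SOURCE A (Python) =====
-- def _matching_chars(s1, s2):
--     # calculates how many chars match in s1 and s2
--     m_len = min(len(s1), len(s2))
--     if m_len < 18:
--         return 0
--
--     mc = 0
--     scores = [2] * m_len
--     scores[11], scores[12], scores[16], scores[17] = 1, 1, 1, 1  # minutes give less score
--     for i in range(m_len):
--         mc += scores[i] if s1[i] == s2[i] else 0
--     return mc
-- ===== SOURCE B (Python) =====
-- def _matching_chars(s1, s2):
--     # Segment decomposition: the minute positions 11,12 and 16,17 cut the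
--     # comparable prefix into five fixed slices; matches are counted per
--     # segment by zipping the slice pairs, each segment with its own weight.
--     m_len = min(len(s1), len(s2))
--     if m_len < 18:
--         return 0
--
--     def eq_count(a, b):
--         return sum(x == y for x, y in zip(a, b))
--
--     segments = [(0, 11, 2), (11, 13, 1), (13, 16, 2), (16, 18, 1), (18, m_len, 2)]
--     return sum(w * eq_count(s1[lo:hi], s2[lo:hi]) for lo, hi, w in segments)
-- ===== Notes on version B (the rewrite author's own statement) =====
-- stated objective: alternative
-- what changed: Replaces the single index loop with a per-index weight table by a segment decomposition: the comparable prefix is cut at the minute positions into five fixed slices, matches are counted by zipping each slice pair, and the weighted per-segment counts are summed.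
import Mathlib
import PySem

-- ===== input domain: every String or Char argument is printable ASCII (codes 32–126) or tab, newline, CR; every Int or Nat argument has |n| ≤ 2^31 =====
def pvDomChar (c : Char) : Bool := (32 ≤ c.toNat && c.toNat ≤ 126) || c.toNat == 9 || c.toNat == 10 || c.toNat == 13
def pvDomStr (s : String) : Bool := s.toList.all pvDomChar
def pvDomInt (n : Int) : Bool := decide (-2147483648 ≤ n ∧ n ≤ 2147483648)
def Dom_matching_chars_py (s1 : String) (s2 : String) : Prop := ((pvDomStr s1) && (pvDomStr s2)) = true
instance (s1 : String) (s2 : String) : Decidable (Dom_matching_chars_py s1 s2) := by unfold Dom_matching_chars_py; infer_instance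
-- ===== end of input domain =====

-- B replaces A's per-index weight table and single index loop by a segment decomposition:
-- five fixed slice pairs are zipped and their match counts summed with per-segment weights
-- (alternative decomposition, same cost).

-- ===== PORT A =====
-- literal port: weight list [2]*m with positions 11,12,16,17 set to 1, then one weighted loop
def matching_chars_py (s1 : String) (s2 : String) : Int :=
  let a := s1.toList
  let b := s2.toList
  let m := min a.length b.length
  if m < 18 then 0
  else
    let scores := ((((List.replicate m (2 : Int)).set 11 1).set 12 1).set 16 1).set 17 1
    (List.range m).foldl
      (fun mc i => mc + (if a.getD i ' ' == b.getD i ' ' then scores.getD i 0 else 0)) 0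

-- ===== PORT B =====
-- port of Source B's helper eq_count: sum of (x == y) over the zipped pair of slices
def pvEqCount (a : List Char) (b : List Char) : Int :=
  (a.zip b).foldl (fun acc p => acc + (if p.1 == p.2 then 1 else 0)) 0

-- literal port of Source B: five (lo, hi, w) segments, weighted zipped slice counts, summed
def matching_chars_py_alt (s1 : String) (s2 : String) : Int :=
  let a := s1.toList
  let b := s2.toList
  let m := min a.length b.length
  if m < 18 then 0
  else
    let segments : List (Int × Int × Int) :=
      [(0, 11, 2), (11, 13, 1), (13, 16, 2), (16, 18, 1), (18, (m : Int), 2)]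
    (segments.map (fun s =>
      s.2.2 * pvEqCount (PySem.List.slice a (some s.1) (some s.2.1))
                        (PySem.List.slice b (some s.1) (some s.2.1)))).sum

-- ===== PRECONDITION & SPEC =====
def Spec_matching_chars_py (s1 : String) (s2 : String) (out : Int) : Prop := out = matching_chars_py_alt s1 s2
instance (s1 : String) (s2 : String) (out : Int) : Decidable (Spec_matching_chars_py s1 s2 out) := by unfold Spec_matching_chars_py; infer_instance

-- ===== CLAIM (what is proved, stated in full; the proofs are below) =====
def Claim_equal_matching_chars_py : Prop := ∀ (s1 : String) (s2 : String), Dom_matching_chars_py s1 s2 → Spec_matching_chars_py s1 s2 (matching_chars_py s1 s2)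

-- ===== LEMMAS AND PROOFS =====

-- the weight A builds by mutation, characterised
theorem pv_scores_getD (m i : Nat) (hi : i < m) :
    (((((List.replicate m (2 : Int)).set 11 1).set 12 1).set 16 1).set 17 1).getD i 0
      = if i = 11 ∨ i = 12 ∨ i = 16 ∨ i = 17 then 1 else 2 := by
  rw [List.getD_eq_getElem?_getD]
  simp only [List.getElem?_set, List.length_set, List.length_replicate, List.getElem?_replicate]
  split_ifs <;> simp_all <;> omega

theorem pv_foldl_add_gen (g : Nat → Int) (l : List Nat) (c : Int) :
    l.foldl (fun acc i => acc + g i) c = c + (l.map g).sum := by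
  induction l generalizing c with
  | nil => simp
  | cons x xs ih => simp [List.foldl, ih]; ring

-- sum with a weight constant on the list collapses to weight × count
theorem pv_sum_const (e : Nat → Bool) (l : List Nat) (c : Int) (w : Nat → Int)
    (hc : ∀ i ∈ l, w i = c) :
    (l.map fun i => if e i then w i else 0).sum = c * ((l.countP e : Nat) : Int) := by
  induction l with
  | nil => simp
  | cons x xs ih =>
    have hx := hc x (by simp)
    have ihx := ih (fun i hi => hc i (by simp [hi]))
    by_cases h : e x <;> simp [h, hx, ihx, List.countP_cons] <;> push_cast <;> ring

-- Source B's eq_count fold is a countP on the zipped list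
theorem pv_foldl_count (l : List (Char × Char)) (c : Int) :
    l.foldl (fun acc p => acc + (if p.1 == p.2 then 1 else 0)) c
      = c + ((l.countP fun p => p.1 == p.2 : Nat) : Int) := by
  induction l generalizing c with
  | nil => simp
  | cons x xs ih =>
    by_cases h : x.1 == x.2 <;>
      simp only [List.foldl, List.countP_cons, h, if_true, if_false, cond_true, cond_false] <;>
      rw [ih] <;> push_cast <;> ring

theorem pv_eqCount_countP (a b : List Char) :
    pvEqCount a b = (((a.zip b).countP fun p => p.1 == p.2 : Nat) : Int) := by
  unfold pvEqCount
  rw [pv_foldl_count]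
  ring

-- counting equal pairs on a window of the zip = counting equal positions on the index window
theorem pv_zip_window (a b : List Char) (k : Nat) :
    ∀ lo, lo + k ≤ min a.length b.length →
    (((a.zip b).drop lo).take k).countP (fun p => p.1 == p.2)
      = (List.range' lo k).countP (fun i => a.getD i ' ' == b.getD i ' ') := by
  induction k with
  | zero => intro lo _; simp
  | succ k ih =>
    intro lo h
    have hlo : lo < (a.zip b).length := by simp [List.length_zip]; omega
    have hla : lo < a.length := by have := List.length_zip (l₁ := a) (l₂ := b); omega
    have hlb : lo < b.length := by have := List.length_zip (l₁ := a) (l₂ := b); omega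
    rw [List.drop_eq_getElem_cons hlo, List.take_succ_cons, List.countP_cons,
        List.range'_succ, List.countP_cons, List.getElem_zip,
        ih (lo + 1) (by omega),
        List.getD_eq_getElem a ' ' hla, List.getD_eq_getElem b ' ' hlb]

-- ===== VERDICT (by name: the statement is the Claim_ definition above) =====
theorem matching_chars_py_spec : Claim_equal_matching_chars_py := by
  intro s1 s2 _
  unfold Spec_matching_chars_py
  simp only [matching_chars_py, matching_chars_py_alt]
  set a := s1.toList with ha
  set b := s2.toList with hb
  set m := min a.length b.length with hmdef
  by_cases hm : m < 18
  · rw [if_pos hm, if_pos hm]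
  · rw [if_neg hm, if_neg hm]
    have hm' : 18 ≤ m := by omega
    set e : Nat → Bool := fun i => a.getD i ' ' == b.getD i ' ' with he
    -- B side: each slice pair count is a count on the index window
    have hseg : ∀ lo hi : Nat, hi ≤ m → lo ≤ hi →
        pvEqCount (PySem.List.slice a (some (lo : Int)) (some (hi : Int)))
                  (PySem.List.slice b (some (lo : Int)) (some (hi : Int)))
          = (((List.range' lo (hi - lo)).countP e : Nat) : Int) := by
      intro lo hi hhi hlo
      rw [PySem.List.slice_natCast, PySem.List.slice_natCast, pv_eqCount_countP]
      congr 1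
      have hz : ((a.drop lo).take (hi - lo)).zip ((b.drop lo).take (hi - lo))
            = ((a.zip b).drop lo).take (hi - lo) := by
        simp [List.zip, List.take_zipWith, List.drop_zipWith]
      rw [hz]
      exact pv_zip_window a b (hi - lo) lo (by omega)
    -- A side: weighted fold = weighted sum over range m
    rw [pv_foldl_add_gen, zero_add]
    have hw : ((List.range m).map fun i =>
          if e i then (((((List.replicate m (2 : Int)).set 11 1).set 12 1).set 16 1).set 17 1).getD i 0
          else 0).sum
        = ((List.range m).map fun i =>
            if e i then (if i = 11 ∨ i = 12 ∨ i = 16 ∨ i = 17 then (1 : Int) else 2) else 0).sum := by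
      apply congrArg
      apply List.map_congr_left
      intro i hi
      rw [List.mem_range] at hi
      rw [pv_scores_getD m i hi]
    rw [hw]
    -- split range m at 11, 13, 16, 18
    have hsplit : List.range m
        = List.range' 0 11 ++ List.range' 11 2 ++ List.range' 13 3
          ++ List.range' 16 2 ++ List.range' 18 (m - 18) := by
      rw [List.range_eq_range']
      rw [List.range'_append_1 (s := 0) (m := 11) (n := 2),
          List.range'_append_1 (s := 0) (m := 13) (n := 3),
          List.range'_append_1 (s := 0) (m := 16) (n := 2),
          List.range'_append_1 (s := 0) (m := 18) (n := m - 18)]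
      congr 1
      omega
    rw [hsplit]
    simp only [List.map_append, List.sum_append]
    have hC : ∀ (lo k : Nat) (c : Int), (∀ i, lo ≤ i → i < lo + k →
          (if i = 11 ∨ i = 12 ∨ i = 16 ∨ i = 17 then (1 : Int) else 2) = c) →
        ((List.range' lo k).map fun i =>
            if e i then (if i = 11 ∨ i = 12 ∨ i = 16 ∨ i = 17 then (1 : Int) else 2) else 0).sum
          = c * (((List.range' lo k).countP e : Nat) : Int) := by
      intro lo k c hc
      apply pv_sum_const
      intro i hi
      rw [List.mem_range'_1] at hi
      exact hc i hi.1 hi.2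
    rw [hC 0 11 2 (by intro i _ h2; have : ¬(i = 11 ∨ i = 12 ∨ i = 16 ∨ i = 17) := by omega
                      simp [this]),
        hC 11 2 1 (by intro i h1 h2; have : i = 11 ∨ i = 12 ∨ i = 16 ∨ i = 17 := by omega
                      simp [this]),
        hC 13 3 2 (by intro i h1 h2; have : ¬(i = 11 ∨ i = 12 ∨ i = 16 ∨ i = 17) := by omega
                      simp [this]),
        hC 16 2 1 (by intro i h1 h2; have : i = 11 ∨ i = 12 ∨ i = 16 ∨ i = 17 := by omega
                      simp [this]),
        hC 18 (m - 18) 2 (by intro i h1 h2; have : ¬(i = 11 ∨ i = 12 ∨ i = 16 ∨ i = 17) := by omega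
                             simp [this])]
    -- B side unfolded
    simp only [List.map_cons, List.map_nil, List.sum_cons, List.sum_nil]
    have h0 := hseg 0 11 (by omega) (by omega)
    have h1 := hseg 11 13 (by omega) (by omega)
    have h2 := hseg 13 16 (by omega) (by omega)
    have h3 := hseg 16 18 (by omega) (by omega)
    have h4 := hseg 18 m (by omega) (by omega)
    simp only [Nat.cast_ofNat, Nat.cast_zero] at h0 h1 h2 h3 h4
    rw [h0, h1, h2, h3, h4]
    norm_num
    ring
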